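-- pv_equiv track=rewrite | github.com/blythos/atolm | tools/debug_adpcm.py | decode_adpcm
-- ===== SOURCE A (Python) =====
-- index_table = [
--     -1, -1, -1, -1, 2, 4, 6, 8,
--     -1, -1, -1, -1, 2, 4, 6, 8
-- ]
--
-- step_table = [
--     7, 8, 9, 10, 11, 12, 13, 14, 16, 17,
--     19, 21, 23, 25, 28, 31, 34, 37, 41, 45,
--     50, 55, 60, 66, 73, 80, 88, 97, 107, 118,
--     130, 143, 157, 173, 190, 209, 230, 253, 279, 307,
--     337, 371, 408, 449, 494, 544, 598, 658, 724, 796,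
--     876, 963, 1060, 1166, 1282, 1411, 1552, 1707, 1878, 2066,
--     2272, 2499, 2749, 3024, 3327, 3660, 4026, 4428, 4871, 5358,
--     5894, 6484, 7132, 7845, 8630, 9493, 10442, 11487, 12635, 13899,
--     15290, 16818, 18500, 20350, 22385, 24623, 27086, 29794, 32767
-- ]
--
-- def decode_adpcm(data):
--     samples = []
--     predictor = 0
--     step_index = 0
--
--     # Header logic?
--     # Usually ADPCM chunks on Saturn/FILM have a small header per chunk (4-16 bytes)
--     # containing initial predictor/step or just size.
--     # Let's try skipping 0, 4, 16 bytes.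
--     # Or assuming header contains state.
--
--     # Try raw first (skip 0)
--     # But usually high nibble / low nibble order matters.
--
--     for byte in data:
--         # High Nibble first?
--         n1 = (byte >> 4) & 0x0F
--         n2 = byte & 0x0F
--
--         # Decode n1
--         step = step_table[step_index]
--         diff = step >> 3
--         if n1 & 4: diff += step
--         if n1 & 2: diff += (step >> 1)
--         if n1 & 1: diff += (step >> 2)
--         if n1 & 8: predictor -= diff
--         else: predictor += diff
--         predictor = max(-32768, min(32767, predictor))
--         samples.append(predictor)
--         step_index += index_table[n1]
--         step_index = max(0, min(88, step_index))
--
--         # Decode n2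
--         step = step_table[step_index]
--         diff = step >> 3
--         if n2 & 4: diff += step
--         if n2 & 2: diff += (step >> 1)
--         if n2 & 1: diff += (step >> 2)
--         if n2 & 8: predictor -= diff
--         else: predictor += diff
--         predictor = max(-32768, min(32767, predictor))
--         samples.append(predictor)
--         step_index += index_table[n2]
--         step_index = max(0, min(88, step_index))
--
--     return samples
-- ===== SOURCE B (Python) =====
-- index_table = [
--     -1, -1, -1, -1, 2, 4, 6, 8,
--     -1, -1, -1, -1, 2, 4, 6, 8
-- ]
--
-- step_table = [
--     7, 8, 9, 10, 11, 12, 13, 14, 16, 17,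
--     19, 21, 23, 25, 28, 31, 34, 37, 41, 45,
--     50, 55, 60, 66, 73, 80, 88, 97, 107, 118,
--     130, 143, 157, 173, 190, 209, 230, 253, 279, 307,
--     337, 371, 408, 449, 494, 544, 598, 658, 724, 796,
--     876, 963, 1060, 1166, 1282, 1411, 1552, 1707, 1878, 2066,
--     2272, 2499, 2749, 3024, 3327, 3660, 4026, 4428, 4871, 5358,
--     5894, 6484, 7132, 7845, 8630, 9493, 10442, 11487, 12635, 13899,
--     15290, 16818, 18500, 20350, 22385, 24623, 27086, 29794, 32767
-- ]
--
-- def _build_tables():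
--     # Precompute, for every (step_index, nibble) pair, the signed predictor
--     # delta and the next step index.  The decoder state machine then needs
--     # no per-sample bit twiddling at all: decoding is pure table lookups.
--     diff_rows = []
--     next_rows = []
--     for si in range(89):
--         step = step_table[si]
--         drow = []
--         nrow = []
--         for n in range(16):
--             d = step >> 3
--             if n & 4: d += step
--             if n & 2: d += step >> 1
--             if n & 1: d += step >> 2
--             drow.append(-d if n & 8 else d)
--             nrow.append(max(0, min(88, si + index_table[n])))
--         diff_rows.append(drow)
--         next_rows.append(nrow)
--     return diff_rows, next_rows
--
-- _DIFFS, _NEXTS = _build_tables()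
--
-- def decode_adpcm(data):
--     samples = []
--     predictor = 0
--     si = 0
--     for byte in data:
--         for n in ((byte >> 4) & 0x0F, byte & 0x0F):
--             predictor = max(-32768, min(32767, predictor + _DIFFS[si][n]))
--             samples.append(predictor)
--             si = _NEXTS[si][n]
--     return samples
-- ===== Notes on version B (the rewrite author's own statement) =====
-- stated objective: alternative
-- what changed: B precomputes an 89x16 signed-delta table and an 89x16 next-step-index table once, turning the decoder into a pure table-driven state machine whose per-sample work is two lookups, instead of A's inline bit-twiddling duplicated for high and low nibbles.
import Mathlib
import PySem

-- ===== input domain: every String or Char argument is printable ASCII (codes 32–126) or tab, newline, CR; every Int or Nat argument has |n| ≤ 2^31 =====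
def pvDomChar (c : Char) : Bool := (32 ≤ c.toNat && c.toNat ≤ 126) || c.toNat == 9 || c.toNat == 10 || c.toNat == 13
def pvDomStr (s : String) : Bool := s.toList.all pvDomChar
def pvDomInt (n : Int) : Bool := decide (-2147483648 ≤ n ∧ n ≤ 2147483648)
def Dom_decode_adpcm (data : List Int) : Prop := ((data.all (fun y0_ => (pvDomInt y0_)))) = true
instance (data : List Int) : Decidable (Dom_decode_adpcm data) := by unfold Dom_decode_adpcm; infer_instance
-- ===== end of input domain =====

-- B precomputes 89x16 signed-delta and next-step-index tables so the decode
-- loop is a pure table-driven state machine (objective: alternative).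


def pvIndexTable : List Int := [
    -1, -1, -1, -1, 2, 4, 6, 8,
    -1, -1, -1, -1, 2, 4, 6, 8]

def pvStepTable : List Int := [
    7, 8, 9, 10, 11, 12, 13, 14, 16, 17,
    19, 21, 23, 25, 28, 31, 34, 37, 41, 45,
    50, 55, 60, 66, 73, 80, 88, 97, 107, 118,
    130, 143, 157, 173, 190, 209, 230, 253, 279, 307,
    337, 371, 408, 449, 494, 544, 598, 658, 724, 796,
    876, 963, 1060, 1166, 1282, 1411, 1552, 1707, 1878, 2066,
    2272, 2499, 2749, 3024, 3327, 3660, 4026, 4428, 4871, 5358,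
    5894, 6484, 7132, 7845, 8630, 9493, 10442, 11487, 12635, 13899,
    15290, 16818, 18500, 20350, 22385, 24623, 27086, 29794, 32767]

-- ===== PORT A =====
-- Literal transliteration: one loop over the bytes, the high-nibble and
-- low-nibble decode blocks duplicated inline, state (samples, predictor, step_index).
-- step_index is clamped to [0,88] and nibbles lie in [0,15], so the table
-- subscripts are always in range; pyGetD's default 0 is never used.
def decode_adpcm (data : List Int) : List Int :=
  (data.foldl (fun (st : List Int × Int × Int) (byte : Int) =>
      let samples := st.1
      let predictor := st.2.1
      let step_index := st.2.2
      let n1 := PySem.Int.band (byte >>> 4) 0x0F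
      let n2 := PySem.Int.band byte 0x0F
      -- Decode n1
      let step := PySem.List.pyGetD pvStepTable step_index 0
      let diff := step >>> 3
      let diff := if PySem.Int.band n1 4 ≠ 0 then diff + step else diff
      let diff := if PySem.Int.band n1 2 ≠ 0 then diff + (step >>> 1) else diff
      let diff := if PySem.Int.band n1 1 ≠ 0 then diff + (step >>> 2) else diff
      let predictor := if PySem.Int.band n1 8 ≠ 0 then predictor - diff else predictor + diff
      let predictor := max (-32768) (min 32767 predictor)
      let samples := samples ++ [predictor]
      let step_index := step_index + PySem.List.pyGetD pvIndexTable n1 0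
      let step_index := max 0 (min 88 step_index)
      -- Decode n2
      let step := PySem.List.pyGetD pvStepTable step_index 0
      let diff := step >>> 3
      let diff := if PySem.Int.band n2 4 ≠ 0 then diff + step else diff
      let diff := if PySem.Int.band n2 2 ≠ 0 then diff + (step >>> 1) else diff
      let diff := if PySem.Int.band n2 1 ≠ 0 then diff + (step >>> 2) else diff
      let predictor := if PySem.Int.band n2 8 ≠ 0 then predictor - diff else predictor + diff
      let predictor := max (-32768) (min 32767 predictor)
      let samples := samples ++ [predictor]
      let step_index := step_index + PySem.List.pyGetD pvIndexTable n2 0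
      let step_index := max 0 (min 88 step_index)
      (samples, predictor, step_index))
    ([], 0, 0)).1

-- ===== PORT B =====
-- B: _build_tables() precomputes, for each (step_index, nibble), the signed
-- predictor delta and the clamped next step index; the decoder is then a
-- table-driven state machine doing two lookups per sample.
def pvBuildTables : List (List Int) × List (List Int) :=
  (PySem.List.pyRange 0 89 1).foldl (fun (acc : List (List Int) × List (List Int)) (si : Int) =>
      let step := PySem.List.pyGetD pvStepTable si 0
      let rows := (PySem.List.pyRange 0 16 1).foldl (fun (r : List Int × List Int) (n : Int) =>
          let d := step >>> 3
          let d := if PySem.Int.band n 4 ≠ 0 then d + step else d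
          let d := if PySem.Int.band n 2 ≠ 0 then d + (step >>> 1) else d
          let d := if PySem.Int.band n 1 ≠ 0 then d + (step >>> 2) else d
          (r.1 ++ [if PySem.Int.band n 8 ≠ 0 then -d else d],
           r.2 ++ [max 0 (min 88 (si + PySem.List.pyGetD pvIndexTable n 0))]))
        ([], [])
      (acc.1 ++ [rows.1], acc.2 ++ [rows.2]))
    ([], [])

def pvDIFFS : List (List Int) := pvBuildTables.1
def pvNEXTS : List (List Int) := pvBuildTables.2

def decode_adpcm_alt (data : List Int) : List Int :=
  (data.foldl (fun (st : List Int × Int × Int) (byte : Int) =>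
      [PySem.Int.band (byte >>> 4) 0x0F, PySem.Int.band byte 0x0F].foldl
        (fun (st : List Int × Int × Int) (n : Int) =>
          let predictor := max (-32768) (min 32767
            (st.2.1 + PySem.List.pyGetD (PySem.List.pyGetD pvDIFFS st.2.2 []) n 0))
          (st.1 ++ [predictor], predictor,
           PySem.List.pyGetD (PySem.List.pyGetD pvNEXTS st.2.2 []) n 0))
        st)
    ([], 0, 0)).1

-- ===== PRECONDITION & SPEC =====
def Spec_decode_adpcm (data : List Int) (out : List Int) : Prop := out = decode_adpcm_alt data
instance (data : List Int) (out : List Int) : Decidable (Spec_decode_adpcm data out) := by unfold Spec_decode_adpcm; infer_instance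

-- ===== CLAIM (what is proved, stated in full; the proofs are below) =====
def Claim_equal_decode_adpcm : Prop := ∀ (data : List Int), Dom_decode_adpcm data → Spec_decode_adpcm data (decode_adpcm data)

-- ===== LEMMAS AND PROOFS =====

-- A's per-nibble decode step, as a named function (proof artifact).
def pvStepA (st : List Int × Int × Int) (n : Int) : List Int × Int × Int :=
  let step := PySem.List.pyGetD pvStepTable st.2.2 0
  let diff := step >>> 3
  let diff := if PySem.Int.band n 4 ≠ 0 then diff + step else diff
  let diff := if PySem.Int.band n 2 ≠ 0 then diff + (step >>> 1) else diff
  let diff := if PySem.Int.band n 1 ≠ 0 then diff + (step >>> 2) else diff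
  let predictor := if PySem.Int.band n 8 ≠ 0 then st.2.1 - diff else st.2.1 + diff
  let predictor := max (-32768) (min 32767 predictor)
  (st.1 ++ [predictor], predictor,
   max 0 (min 88 (st.2.2 + PySem.List.pyGetD pvIndexTable n 0)))

-- B's per-nibble decode step (the inner-fold body of decode_adpcm_alt).
def pvStepB (st : List Int × Int × Int) (n : Int) : List Int × Int × Int :=
  let predictor := max (-32768) (min 32767
    (st.2.1 + PySem.List.pyGetD (PySem.List.pyGetD pvDIFFS st.2.2 []) n 0))
  (st.1 ++ [predictor], predictor,
   PySem.List.pyGetD (PySem.List.pyGetD pvNEXTS st.2.2 []) n 0)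

-- the table-entry functions the build loop tabulates
def pvDiffFun (si n : Int) : Int :=
  let step := PySem.List.pyGetD pvStepTable si 0
  let d := step >>> 3
  let d := if PySem.Int.band n 4 ≠ 0 then d + step else d
  let d := if PySem.Int.band n 2 ≠ 0 then d + (step >>> 1) else d
  let d := if PySem.Int.band n 1 ≠ 0 then d + (step >>> 2) else d
  if PySem.Int.band n 8 ≠ 0 then -d else d

def pvNextFun (si n : Int) : Int :=
  max 0 (min 88 (si + PySem.List.pyGetD pvIndexTable n 0))

-- a fold that appends one element to each component of a pair is a pair of maps
theorem pv_foldl_pair {α : Type} (f g : α → Int) (l : List α) (as bs : List Int) :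
    l.foldl (fun (ab : List Int × List Int) x => (ab.1 ++ [f x], ab.2 ++ [g x])) (as, bs)
      = (as ++ l.map f, bs ++ l.map g) := by
  induction l generalizing as bs with
  | nil => simp
  | cons x l ih => simp [ih]

theorem pv_foldl_pairL {α : Type} (f g : α → List Int) (l : List α)
    (as bs : List (List Int)) :
    l.foldl (fun (ab : List (List Int) × List (List Int)) x => (ab.1 ++ [f x], ab.2 ++ [g x])) (as, bs)
      = (as ++ l.map f, bs ++ l.map g) := by
  induction l generalizing as bs with
  | nil => simp
  | cons x l ih => simp [ih]

theorem pv_tables_eq :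
    pvBuildTables
      = ((PySem.List.pyRange 0 89 1).map (fun si => (PySem.List.pyRange 0 16 1).map (pvDiffFun si)),
         (PySem.List.pyRange 0 89 1).map (fun si => (PySem.List.pyRange 0 16 1).map (pvNextFun si))) := by
  have hinner : ∀ si : Int,
      (PySem.List.pyRange 0 16 1).foldl (fun (r : List Int × List Int) (n : Int) =>
          let step := PySem.List.pyGetD pvStepTable si 0
          let d := step >>> 3
          let d := if PySem.Int.band n 4 ≠ 0 then d + step else d
          let d := if PySem.Int.band n 2 ≠ 0 then d + (step >>> 1) else d
          let d := if PySem.Int.band n 1 ≠ 0 then d + (step >>> 2) else d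
          (r.1 ++ [if PySem.Int.band n 8 ≠ 0 then -d else d],
           r.2 ++ [max 0 (min 88 (si + PySem.List.pyGetD pvIndexTable n 0))])) ([], [])
        = ((PySem.List.pyRange 0 16 1).map (pvDiffFun si),
           (PySem.List.pyRange 0 16 1).map (pvNextFun si)) := by
    intro si
    have := pv_foldl_pair (pvDiffFun si) (pvNextFun si) (PySem.List.pyRange 0 16 1) [] []
    simpa [pvDiffFun, pvNextFun] using this
  unfold pvBuildTables
  have houter := pv_foldl_pairL
      (fun si => (PySem.List.pyRange 0 16 1).map (pvDiffFun si))
      (fun si => (PySem.List.pyRange 0 16 1).map (pvNextFun si))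
      (PySem.List.pyRange 0 89 1) [] []
  rw [show (fun (acc : List (List Int) × List (List Int)) (si : Int) =>
      let step := PySem.List.pyGetD pvStepTable si 0
      let rows := (PySem.List.pyRange 0 16 1).foldl (fun (r : List Int × List Int) (n : Int) =>
          let d := step >>> 3
          let d := if PySem.Int.band n 4 ≠ 0 then d + step else d
          let d := if PySem.Int.band n 2 ≠ 0 then d + (step >>> 1) else d
          let d := if PySem.Int.band n 1 ≠ 0 then d + (step >>> 2) else d
          (r.1 ++ [if PySem.Int.band n 8 ≠ 0 then -d else d],
           r.2 ++ [max 0 (min 88 (si + PySem.List.pyGetD pvIndexTable n 0))]))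
        ([], [])
      (acc.1 ++ [rows.1], acc.2 ++ [rows.2]))
    = (fun (acc : List (List Int) × List (List Int)) (si : Int) =>
        (acc.1 ++ [(PySem.List.pyRange 0 16 1).map (pvDiffFun si)],
         acc.2 ++ [(PySem.List.pyRange 0 16 1).map (pvNextFun si)])) from
      funext fun acc => funext fun si => by simp only [hinner si]]
  simpa using houter

theorem pv_lookup_diff (si n : Int) (h1 : 0 ≤ si) (h2 : si < 89) (h3 : 0 ≤ n) (h4 : n < 16) :
    PySem.List.pyGetD (PySem.List.pyGetD pvDIFFS si []) n 0 = pvDiffFun si n := by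
  unfold pvDIFFS
  rw [pv_tables_eq]
  rw [PySem.List.pyGetD_map_pyRange_of_nonneg _ 89 si [] h1 h2,
      PySem.List.pyGetD_map_pyRange_of_nonneg _ 16 n 0 h3 h4]

theorem pv_lookup_next (si n : Int) (h1 : 0 ≤ si) (h2 : si < 89) (h3 : 0 ≤ n) (h4 : n < 16) :
    PySem.List.pyGetD (PySem.List.pyGetD pvNEXTS si []) n 0 = pvNextFun si n := by
  unfold pvNEXTS
  rw [pv_tables_eq]
  rw [PySem.List.pyGetD_map_pyRange_of_nonneg _ 89 si [] h1 h2,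
      PySem.List.pyGetD_map_pyRange_of_nonneg _ 16 n 0 h3 h4]

theorem pv_band15_bounds (a : Int) : 0 ≤ PySem.Int.band a 15 ∧ PySem.Int.band a 15 < 16 := by
  unfold PySem.Int.band
  split_ifs with h1 h2 h2
  · have := Nat.and_le_right (n := a.toNat) (m := (15 : Int).toNat)
    constructor
    · positivity
    · have : a.toNat &&& (15 : Int).toNat ≤ 15 := by simpa using this
      omega
  · omega
  · have hle : (15 : Int).toNat &&& (-a - 1).toNat ≤ (15 : Int).toNat := Nat.and_le_left
    constructor <;> omega
  · omega

theorem pv_stepB_eq_stepA (st : List Int × Int × Int) (n : Int)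
    (hsi : 0 ≤ st.2.2 ∧ st.2.2 ≤ 88) (hn : 0 ≤ n ∧ n < 16) :
    pvStepB st n = pvStepA st n := by
  unfold pvStepB pvStepA
  rw [pv_lookup_diff st.2.2 n hsi.1 (by omega) hn.1 hn.2,
      pv_lookup_next st.2.2 n hsi.1 (by omega) hn.1 hn.2]
  unfold pvDiffFun pvNextFun
  simp only []
  split_ifs <;> simp [sub_eq_add_neg]

theorem pv_stepA_si_bounds (st : List Int × Int × Int) (n : Int) :
    0 ≤ (pvStepA st n).2.2 ∧ (pvStepA st n).2.2 ≤ 88 := by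
  unfold pvStepA
  constructor
  · exact le_max_left 0 _
  · exact max_le (by norm_num) (min_le_left _ _)

-- A's per-byte body is exactly two pvStepA applications.
theorem pv_bodyA_eq (st : List Int × Int × Int) (byte : Int) :
    (fun (st : List Int × Int × Int) (byte : Int) =>
      let samples := st.1
      let predictor := st.2.1
      let step_index := st.2.2
      let n1 := PySem.Int.band (byte >>> 4) 0x0F
      let n2 := PySem.Int.band byte 0x0F
      let step := PySem.List.pyGetD pvStepTable step_index 0
      let diff := step >>> 3
      let diff := if PySem.Int.band n1 4 ≠ 0 then diff + step else diff
      let diff := if PySem.Int.band n1 2 ≠ 0 then diff + (step >>> 1) else diff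
      let diff := if PySem.Int.band n1 1 ≠ 0 then diff + (step >>> 2) else diff
      let predictor := if PySem.Int.band n1 8 ≠ 0 then predictor - diff else predictor + diff
      let predictor := max (-32768) (min 32767 predictor)
      let samples := samples ++ [predictor]
      let step_index := step_index + PySem.List.pyGetD pvIndexTable n1 0
      let step_index := max 0 (min 88 step_index)
      let step := PySem.List.pyGetD pvStepTable step_index 0
      let diff := step >>> 3
      let diff := if PySem.Int.band n2 4 ≠ 0 then diff + step else diff
      let diff := if PySem.Int.band n2 2 ≠ 0 then diff + (step >>> 1) else diff
      let diff := if PySem.Int.band n2 1 ≠ 0 then diff + (step >>> 2) else diff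
      let predictor := if PySem.Int.band n2 8 ≠ 0 then predictor - diff else predictor + diff
      let predictor := max (-32768) (min 32767 predictor)
      let samples := samples ++ [predictor]
      let step_index := step_index + PySem.List.pyGetD pvIndexTable n2 0
      let step_index := max 0 (min 88 step_index)
      (samples, predictor, step_index)) st byte
    = pvStepA (pvStepA st (PySem.Int.band (byte >>> 4) 0x0F)) (PySem.Int.band byte 0x0F) := by
  rfl

theorem pv_fold_eq (l : List Int) (st : List Int × Int × Int)
    (hsi : 0 ≤ st.2.2 ∧ st.2.2 ≤ 88) :
    l.foldl (fun st (byte : Int) =>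
        pvStepA (pvStepA st (PySem.Int.band (byte >>> 4) 0x0F)) (PySem.Int.band byte 0x0F)) st
    = l.foldl (fun st (byte : Int) =>
        pvStepB (pvStepB st (PySem.Int.band (byte >>> 4) 0x0F)) (PySem.Int.band byte 0x0F)) st := by
  induction l generalizing st with
  | nil => rfl
  | cons b l ih =>
    simp only [List.foldl_cons]
    have hn1 := pv_band15_bounds (b >>> 4)
    have hn2 := pv_band15_bounds b
    rw [pv_stepB_eq_stepA st _ hsi ⟨hn1.1, hn1.2⟩,
        pv_stepB_eq_stepA _ _ (pv_stepA_si_bounds st _) ⟨hn2.1, hn2.2⟩]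
    exact ih _ (pv_stepA_si_bounds _ _)

-- ===== VERDICT (by name: the statement is the Claim_ definition above) =====
theorem decode_adpcm_spec : Claim_equal_decode_adpcm := by
  intro data _
  unfold Spec_decode_adpcm decode_adpcm decode_adpcm_alt
  rw [show (fun (st : List Int × Int × Int) (byte : Int) =>
      let samples := st.1
      let predictor := st.2.1
      let step_index := st.2.2
      let n1 := PySem.Int.band (byte >>> 4) 0x0F
      let n2 := PySem.Int.band byte 0x0F
      let step := PySem.List.pyGetD pvStepTable step_index 0
      let diff := step >>> 3
      let diff := if PySem.Int.band n1 4 ≠ 0 then diff + step else diff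
      let diff := if PySem.Int.band n1 2 ≠ 0 then diff + (step >>> 1) else diff
      let diff := if PySem.Int.band n1 1 ≠ 0 then diff + (step >>> 2) else diff
      let predictor := if PySem.Int.band n1 8 ≠ 0 then predictor - diff else predictor + diff
      let predictor := max (-32768) (min 32767 predictor)
      let samples := samples ++ [predictor]
      let step_index := step_index + PySem.List.pyGetD pvIndexTable n1 0
      let step_index := max 0 (min 88 step_index)
      let step := PySem.List.pyGetD pvStepTable step_index 0
      let diff := step >>> 3
      let diff := if PySem.Int.band n2 4 ≠ 0 then diff + step else diff
      let diff := if PySem.Int.band n2 2 ≠ 0 then diff + (step >>> 1) else diff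
      let diff := if PySem.Int.band n2 1 ≠ 0 then diff + (step >>> 2) else diff
      let predictor := if PySem.Int.band n2 8 ≠ 0 then predictor - diff else predictor + diff
      let predictor := max (-32768) (min 32767 predictor)
      let samples := samples ++ [predictor]
      let step_index := step_index + PySem.List.pyGetD pvIndexTable n2 0
      let step_index := max 0 (min 88 step_index)
      (samples, predictor, step_index))
    = (fun st (byte : Int) =>
        pvStepA (pvStepA st (PySem.Int.band (byte >>> 4) 0x0F)) (PySem.Int.band byte 0x0F)) from
      funext fun st => funext fun b => pv_bodyA_eq st b]
  rw [pv_fold_eq data ([], 0, 0) (by norm_num)]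
  rfl
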